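-- pv_equiv track=rewrite | github.com/DTennant/Prometheus | examples/example_run/best_agent/src/agent/planner.py | create_plan
-- ===== SOURCE A (Python) =====
-- def create_plan(prompt: str) -> list[str]:
--     steps = []
--     steps.append("Read relevant files to understand the codebase")
--     if any(kw in prompt.lower() for kw in ["fix", "bug", "error", "fail"]):
--         steps.append("Identify the root cause of the issue")
--         steps.append("Implement the fix")
--         steps.append("Run tests to verify the fix")
--     elif any(kw in prompt.lower() for kw in ["write", "create", "add", "implement"]):
--         steps.append("Plan the implementation approach")
--         steps.append("Write the code")
--         steps.append("Run tests to verify correctness")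
--     elif any(kw in prompt.lower() for kw in ["refactor", "rename", "move", "change"]):
--         steps.append("Find all references to the target")
--         steps.append("Make the changes across all files")
--         steps.append("Run tests to verify nothing broke")
--     else:
--         steps.append("Analyze what needs to be done")
--         steps.append("Implement the solution")
--         steps.append("Verify the result")
--     return steps
-- ===== SOURCE B (Python) =====
-- # Single left-to-right scan of the lowered prompt: at every position, check which
-- # keywords start there and keep the MINIMUM category index seen; the final minimum
-- # selects the plan tail (3 = default).  Different algorithm: one positional text
-- # scan with a running min-accumulator instead of staged per-keyword substring
-- # searches / an if-elif chain.
-- _KEYWORDS = [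
--     ("fix", 0), ("bug", 0), ("error", 0), ("fail", 0),
--     ("write", 1), ("create", 1), ("add", 1), ("implement", 1),
--     ("refactor", 2), ("rename", 2), ("move", 2), ("change", 2),
-- ]
--
-- _TAILS = [
--     ["Identify the root cause of the issue",
--      "Implement the fix",
--      "Run tests to verify the fix"],
--     ["Plan the implementation approach",
--      "Write the code",
--      "Run tests to verify correctness"],
--     ["Find all references to the target",
--      "Make the changes across all files",
--      "Run tests to verify nothing broke"],
--     ["Analyze what needs to be done",
--      "Implement the solution",
--      "Verify the result"],
-- ]
--
--
-- def create_plan(prompt: str) -> list[str]: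
--     low = prompt.lower()
--     best = 3
--     for i in range(len(low)):
--         for kw, cat in _KEYWORDS:
--             if cat < best and low.startswith(kw, i):
--                 best = cat
--     return ["Read relevant files to understand the codebase"] + _TAILS[best]
-- ===== Notes on version B (the rewrite author's own statement) =====
-- stated objective: alternative
-- what changed: Replaces the if/elif chain of per-keyword substring searches with a single left-to-right scan over the lowered prompt's positions that keeps the minimum category index of any keyword starting at each position, then indexes a tail table with that minimum.
import Mathlib
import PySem

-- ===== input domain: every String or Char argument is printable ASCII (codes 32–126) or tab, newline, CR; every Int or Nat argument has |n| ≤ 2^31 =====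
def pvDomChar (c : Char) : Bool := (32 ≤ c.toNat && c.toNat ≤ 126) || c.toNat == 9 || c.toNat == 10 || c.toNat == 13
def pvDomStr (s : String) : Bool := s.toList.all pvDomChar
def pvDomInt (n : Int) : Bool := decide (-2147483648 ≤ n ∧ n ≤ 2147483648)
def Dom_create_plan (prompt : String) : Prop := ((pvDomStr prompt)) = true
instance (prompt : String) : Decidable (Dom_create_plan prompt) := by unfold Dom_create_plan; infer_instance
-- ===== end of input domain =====

-- B replaces A's if/elif chain of per-keyword substring searches by ONE positional scan of the
-- lowered prompt keeping the minimum category index of any keyword starting at each position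
-- (alternative algorithm, same result).

-- ===== PORT A =====
def create_plan (prompt : String) : List String :=
  let steps : List String := []
  let steps := steps ++ ["Read relevant files to understand the codebase"]
  if ["fix", "bug", "error", "fail"].any
      (fun kw => PySem.Str.isIn kw (PySem.Str.lower prompt)) then
    steps ++ ["Identify the root cause of the issue",
              "Implement the fix",
              "Run tests to verify the fix"]
  else if ["write", "create", "add", "implement"].any
      (fun kw => PySem.Str.isIn kw (PySem.Str.lower prompt)) then
    steps ++ ["Plan the implementation approach",
              "Write the code",
              "Run tests to verify correctness"]
  else if ["refactor", "rename", "move", "change"].any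
      (fun kw => PySem.Str.isIn kw (PySem.Str.lower prompt)) then
    steps ++ ["Find all references to the target",
              "Make the changes across all files",
              "Run tests to verify nothing broke"]
  else
    steps ++ ["Analyze what needs to be done",
              "Implement the solution",
              "Verify the result"]

-- ===== PORT B =====
def kwCats : List (String × Nat) :=
  [("fix", 0), ("bug", 0), ("error", 0), ("fail", 0),
   ("write", 1), ("create", 1), ("add", 1), ("implement", 1),
   ("refactor", 2), ("rename", 2), ("move", 2), ("change", 2)]

def tails : List (List String) :=
  [["Identify the root cause of the issue",
    "Implement the fix",
    "Run tests to verify the fix"],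
   ["Plan the implementation approach",
    "Write the code",
    "Run tests to verify correctness"],
   ["Find all references to the target",
    "Make the changes across all files",
    "Run tests to verify nothing broke"],
   ["Analyze what needs to be done",
    "Implement the solution",
    "Verify the result"]]

-- Source B's nested for-loops: outer over positions, inner over keywords, min-accumulator `best`;
-- low.startswith(kw, i) is exactly Chars.startswith on the dropped character list (0 ≤ i < len).
def create_plan_alt (prompt : String) : List String :=
  let chars := (PySem.Str.lower prompt).toList
  let best := (List.range chars.length).foldl
    (fun b i => kwCats.foldl
      (fun b p => if p.2 < b ∧ PySem.Chars.startswith (chars.drop i) p.1.toList = true then p.2 else b) b) 3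
  ["Read relevant files to understand the codebase"] ++ tails.getD best []

-- ===== PRECONDITION & SPEC =====
def Spec_create_plan (prompt : String) (out : List String) : Prop := out = create_plan_alt prompt
instance (prompt : String) (out : List String) : Decidable (Spec_create_plan prompt out) := by unfold Spec_create_plan; infer_instance

-- ===== CLAIM (what is proved, stated in full; the proofs are below) =====
def Claim_equal_create_plan : Prop := ∀ (prompt : String), Dom_create_plan prompt → Spec_create_plan prompt (create_plan prompt)

-- ===== LEMMAS AND PROOFS =====

-- inner fold (over the keyword table) never increases the accumulator
theorem inner_le (pre : String → Bool) (l : List (String × Nat)) (b : Nat) :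
    l.foldl (fun b p => if p.2 < b ∧ pre p.1 = true then p.2 else b) b ≤ b := by
  induction l generalizing b with
  | nil => simp
  | cons x l ih =>
      simp only [List.foldl_cons]
      refine le_trans (ih _) ?_
      split <;> omega

-- the inner fold's result is the start value or the category of a matching table entry
theorem inner_cases (pre : String → Bool) (l : List (String × Nat)) (b : Nat) :
    l.foldl (fun b p => if p.2 < b ∧ pre p.1 = true then p.2 else b) b = b ∨
      ∃ p ∈ l, l.foldl (fun b p => if p.2 < b ∧ pre p.1 = true then p.2 else b) b = p.2 ∧ pre p.1 = true := by
  induction l generalizing b with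
  | nil => simp
  | cons x l ih =>
      simp only [List.foldl_cons]
      by_cases hc : x.2 < b ∧ pre x.1 = true
      · simp only [if_pos hc]
        rcases ih x.2 with h | ⟨p, hp, h1, h2⟩
        · exact Or.inr ⟨x, List.mem_cons_self .., h, hc.2⟩
        · exact Or.inr ⟨p, List.mem_cons_of_mem _ hp, h1, h2⟩
      · simp only [if_neg hc]
        rcases ih b with h | ⟨p, hp, h1, h2⟩
        · exact Or.inl h
        · exact Or.inr ⟨p, List.mem_cons_of_mem _ hp, h1, h2⟩

-- if some table entry matches, the inner fold's result is at most its category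
theorem inner_opt (pre : String → Bool) (l : List (String × Nat)) (b : Nat)
    (p : String × Nat) (hp : p ∈ l) (hpre : pre p.1 = true) :
    l.foldl (fun b p => if p.2 < b ∧ pre p.1 = true then p.2 else b) b ≤ p.2 := by
  induction l generalizing b with
  | nil => simp at hp
  | cons x l ih =>
      simp only [List.foldl_cons]
      rcases List.mem_cons.1 hp with rfl | hp'
      · refine le_trans (inner_le _ _ _) ?_
        simp only [hpre, and_true]
        split <;> omega
      · exact ih _ hp'

-- the outer fold (over positions) never increases the accumulator
theorem outer_le (g : Nat → String → Bool) (kwl : List (String × Nat)) (l : List Nat) (b : Nat) :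
    l.foldl (fun b i => kwl.foldl (fun b p => if p.2 < b ∧ g i p.1 = true then p.2 else b) b) b ≤ b := by
  induction l generalizing b with
  | nil => simp
  | cons i l ih => exact le_trans (ih _) (inner_le _ _ _)

-- the outer fold's result is the start value or the category of an entry matching at some position
theorem outer_cases (g : Nat → String → Bool) (kwl : List (String × Nat)) (l : List Nat) (b : Nat) :
    l.foldl (fun b i => kwl.foldl (fun b p => if p.2 < b ∧ g i p.1 = true then p.2 else b) b) b = b ∨
      ∃ i ∈ l, ∃ p ∈ kwl,
        l.foldl (fun b i => kwl.foldl (fun b p => if p.2 < b ∧ g i p.1 = true then p.2 else b) b) b = p.2 ∧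
        g i p.1 = true := by
  induction l generalizing b with
  | nil => simp
  | cons i l ih =>
      simp only [List.foldl_cons]
      rcases ih (kwl.foldl (fun b p => if p.2 < b ∧ g i p.1 = true then p.2 else b) b) with h | ⟨j, hj, p, hp, h1, h2⟩
      · rw [h]
        rcases inner_cases (g i) kwl b with h' | ⟨p, hp, h1, h2⟩
        · exact Or.inl h'
        · exact Or.inr ⟨i, List.mem_cons_self .., p, hp, h1, h2⟩
      · exact Or.inr ⟨j, List.mem_cons_of_mem _ hj, p, hp, h1, h2⟩

-- if an entry matches at some listed position, the outer fold's result is at most its category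
theorem outer_opt (g : Nat → String → Bool) (kwl : List (String × Nat)) (l : List Nat) (b : Nat)
    (i : Nat) (hi : i ∈ l) (p : String × Nat) (hp : p ∈ kwl) (hpre : g i p.1 = true) :
    l.foldl (fun b i => kwl.foldl (fun b p => if p.2 < b ∧ g i p.1 = true then p.2 else b) b) b ≤ p.2 := by
  induction l generalizing b with
  | nil => simp at hi
  | cons j l ih =>
      simp only [List.foldl_cons]
      rcases List.mem_cons.1 hi with rfl | hi'
      · exact le_trans (outer_le _ _ _ _) (inner_opt _ _ _ _ hp hpre)
      · exact ih _ hi'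

-- an occurrence found by the scan is a Python substring occurrence
theorem occ_isIn (s : String) (kw : String) (i : Nat)
    (h : PySem.Chars.startswith (s.toList.drop i) kw.toList = true) :
    PySem.Str.isIn kw s = true := by
  rw [PySem.Chars.startswith_iff] at h
  rw [PySem.Str.isIn_eq, ← PySem.Chars.exists_prefix_drop_iff_isIn]
  exact ⟨i, h⟩

-- a Python substring occurrence of a nonempty keyword is found at some scanned position
theorem isIn_occ (s : String) (kw : String) (hne : kw.toList ≠ [])
    (h : PySem.Str.isIn kw s = true) :
    ∃ i ∈ List.range s.toList.length, PySem.Chars.startswith (s.toList.drop i) kw.toList = true := by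
  rw [PySem.Str.isIn_eq, ← PySem.Chars.exists_prefix_drop_iff_isIn] at h
  obtain ⟨j, hj⟩ := h
  refine ⟨j, ?_, (PySem.Chars.startswith_iff _ _).mpr hj⟩
  rw [List.mem_range]
  by_contra hge
  rw [Nat.not_lt] at hge
  rw [List.drop_eq_nil_of_le hge] at hj
  exact hne (List.prefix_nil.mp hj)

-- an occurrence of a table entry raises the corresponding branch flag of A
theorem occ_flag (low : String) (i : Nat) (p : String × Nat) (hp : p ∈ kwCats)
    (hsw : PySem.Chars.startswith (low.toList.drop i) p.1.toList = true) :
    (p.2 = 0 → (["fix", "bug", "error", "fail"].any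
        (fun kw => PySem.Str.isIn kw low)) = true) ∧
    (p.2 = 1 → (["write", "create", "add", "implement"].any
        (fun kw => PySem.Str.isIn kw low)) = true) ∧
    (p.2 = 2 → (["refactor", "rename", "move", "change"].any
        (fun kw => PySem.Str.isIn kw low)) = true) := by
  have hin := occ_isIn low p.1 i hsw
  fin_cases hp
  · exact ⟨fun _ => List.any_eq_true.mpr ⟨"fix", by decide, hin⟩, fun hc => absurd hc (by decide), fun hc => absurd hc (by decide)⟩
  · exact ⟨fun _ => List.any_eq_true.mpr ⟨"bug", by decide, hin⟩, fun hc => absurd hc (by decide), fun hc => absurd hc (by decide)⟩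
  · exact ⟨fun _ => List.any_eq_true.mpr ⟨"error", by decide, hin⟩, fun hc => absurd hc (by decide), fun hc => absurd hc (by decide)⟩
  · exact ⟨fun _ => List.any_eq_true.mpr ⟨"fail", by decide, hin⟩, fun hc => absurd hc (by decide), fun hc => absurd hc (by decide)⟩
  · exact ⟨fun hc => absurd hc (by decide), fun _ => List.any_eq_true.mpr ⟨"write", by decide, hin⟩, fun hc => absurd hc (by decide)⟩
  · exact ⟨fun hc => absurd hc (by decide), fun _ => List.any_eq_true.mpr ⟨"create", by decide, hin⟩, fun hc => absurd hc (by decide)⟩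
  · exact ⟨fun hc => absurd hc (by decide), fun _ => List.any_eq_true.mpr ⟨"add", by decide, hin⟩, fun hc => absurd hc (by decide)⟩
  · exact ⟨fun hc => absurd hc (by decide), fun _ => List.any_eq_true.mpr ⟨"implement", by decide, hin⟩, fun hc => absurd hc (by decide)⟩
  · exact ⟨fun hc => absurd hc (by decide), fun hc => absurd hc (by decide), fun _ => List.any_eq_true.mpr ⟨"refactor", by decide, hin⟩⟩
  · exact ⟨fun hc => absurd hc (by decide), fun hc => absurd hc (by decide), fun _ => List.any_eq_true.mpr ⟨"rename", by decide, hin⟩⟩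
  · exact ⟨fun hc => absurd hc (by decide), fun hc => absurd hc (by decide), fun _ => List.any_eq_true.mpr ⟨"move", by decide, hin⟩⟩
  · exact ⟨fun hc => absurd hc (by decide), fun hc => absurd hc (by decide), fun _ => List.any_eq_true.mpr ⟨"change", by decide, hin⟩⟩

-- ===== VERDICT (by name: the statement is the Claim_ definition above) =====
theorem create_plan_spec : Claim_equal_create_plan := by
  intro prompt _
  unfold Spec_create_plan create_plan
  have halt : create_plan_alt prompt =
      ["Read relevant files to understand the codebase"] ++
        tails.getD ((List.range (PySem.Str.lower prompt).toList.length).foldl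
          (fun b i => kwCats.foldl
            (fun b p => if p.2 < b ∧ PySem.Chars.startswith ((PySem.Str.lower prompt).toList.drop i) p.1.toList = true then p.2 else b) b) 3) [] := rfl
  rw [halt]
  set low := PySem.Str.lower prompt with hlow
  set m := (List.range low.toList.length).foldl
    (fun b i => kwCats.foldl
      (fun b p => if p.2 < b ∧ PySem.Chars.startswith (low.toList.drop i) p.1.toList = true then p.2 else b) b) 3 with hm
  have hle : ∀ (kw : String) (c : Nat), (kw, c) ∈ kwCats → kw.toList ≠ [] →
      PySem.Str.isIn kw low = true → m ≤ c := by
    intro kw c hmem hne hin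
    obtain ⟨i, hi, hsw⟩ := isIn_occ low kw hne hin
    rw [hm]
    exact outer_opt (fun i kw => PySem.Chars.startswith (low.toList.drop i) kw.toList)
      kwCats _ 3 i hi (kw, c) hmem hsw
  have hcases : m = 3 ∨ ∃ i ∈ List.range low.toList.length, ∃ p ∈ kwCats,
      m = p.2 ∧ PySem.Chars.startswith (low.toList.drop i) p.1.toList = true := by
    rw [hm]
    exact outer_cases (fun i kw => PySem.Chars.startswith (low.toList.drop i) kw.toList)
      kwCats _ 3
  split_ifs with h0 h1 h2
  · -- a "fix"-class keyword occurs: m = 0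
    simp only [List.any_eq_true, List.mem_cons, List.not_mem_nil, or_false] at h0
    have hm0 : m = 0 := by
      rcases h0 with ⟨kw, hkw, hin⟩
      have : m ≤ 0 := by
        rcases hkw with rfl | rfl | rfl | rfl
        · exact hle _ 0 (by decide) (by decide) hin
        · exact hle _ 0 (by decide) (by decide) hin
        · exact hle _ 0 (by decide) (by decide) hin
        · exact hle _ 0 (by decide) (by decide) hin
      omega
    rw [hm0]; rfl
  · -- no "fix"-class but a "write"-class keyword: m = 1
    simp only [List.any_eq_true, List.mem_cons, List.not_mem_nil, or_false] at h1
    have hle1 : m ≤ 1 := by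
      rcases h1 with ⟨kw, hkw, hin⟩
      rcases hkw with rfl | rfl | rfl | rfl
      · exact hle _ 1 (by decide) (by decide) hin
      · exact hle _ 1 (by decide) (by decide) hin
      · exact hle _ 1 (by decide) (by decide) hin
      · exact hle _ 1 (by decide) (by decide) hin
    have hne0 : m ≠ 0 := by
      intro hm0
      rcases hcases with h | ⟨i, hi, p, hp, heq, hsw⟩
      · omega
      · exact h0 ((occ_flag low i p hp hsw).1 (by omega))
    have hm1 : m = 1 := by omega
    rw [hm1]; rfl
  · -- only a "refactor"-class keyword: m = 2
    simp only [List.any_eq_true, List.mem_cons, List.not_mem_nil, or_false] at h2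
    have hle2 : m ≤ 2 := by
      rcases h2 with ⟨kw, hkw, hin⟩
      rcases hkw with rfl | rfl | rfl | rfl
      · exact hle _ 2 (by decide) (by decide) hin
      · exact hle _ 2 (by decide) (by decide) hin
      · exact hle _ 2 (by decide) (by decide) hin
      · exact hle _ 2 (by decide) (by decide) hin
    have hne01 : m ≠ 0 ∧ m ≠ 1 := by
      constructor <;> intro hmv <;>
      · rcases hcases with h | ⟨i, hi, p, hp, heq, hsw⟩
        · omega
        · first
            | exact h0 ((occ_flag low i p hp hsw).1 (by omega))
            | exact h1 ((occ_flag low i p hp hsw).2.1 (by omega))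
    have hm2 : m = 2 := by omega
    rw [hm2]; rfl
  · -- no keyword at all: m = 3
    have hm3 : m = 3 := by
      rcases hcases with h | ⟨i, hi, p, hp, heq, hsw⟩
      · exact h
      · exfalso
        have hflag := occ_flag low i p hp hsw
        have hpc : p.2 = 0 ∨ p.2 = 1 ∨ p.2 = 2 := by fin_cases hp <;> simp
        rcases hpc with hc | hc | hc
        · exact h0 (hflag.1 hc)
        · exact h1 (hflag.2.1 hc)
        · exact h2 (hflag.2.2 hc)
    rw [hm3]; rfl
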